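-- pv_equiv track=rewrite | github.com/lenkeshananth/SMDMSSdataset | sperm_pipeline/train_finegrained_v2.py | get_primary_anomaly
-- ===== SOURCE A (Python) =====
-- def get_primary_anomaly(codes):
--     """Get the primary anomaly class."""
--     if not codes or codes == ['NR']:
--         return 'Nr'
--
--     codes = [c.upper() for c in codes]
--     priority_order = ['A', 'B', 'C', 'D', 'E', 'F', 'G', 'H', 'J', 'L', 'N', 'O']
--
--     for code in priority_order:
--         if code in codes:
--             return code
--
--     return 'Nr'
-- ===== SOURCE B (Python) =====
-- _PRIORITY = ['A', 'B', 'C', 'D', 'E', 'F', 'G', 'H', 'J', 'L', 'N', 'O']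
-- _RANK = {c: i for i, c in enumerate(_PRIORITY)}
--
--
-- def get_primary_anomaly(codes):
--     """Get the primary anomaly class."""
--     if not codes or codes == ['NR']:
--         return 'Nr'
--     best = None  # (rank, letter) with the smallest rank seen so far
--     for c in codes:
--         u = c.upper()
--         r = _RANK.get(u)
--         if r is not None and (best is None or r < best[0]):
--             best = (r, u)
--     return best[1] if best is not None else 'Nr'
-- ===== Notes on version B (the rewrite author's own statement) =====
-- stated objective: alternative
-- what changed: Instead of scanning the priority list and testing membership of each letter in the codes (12 passes over codes), B builds a rank dictionary once and does a single min-over-codes accumulator pass tracking the code with the smallest rank.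
import Mathlib
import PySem

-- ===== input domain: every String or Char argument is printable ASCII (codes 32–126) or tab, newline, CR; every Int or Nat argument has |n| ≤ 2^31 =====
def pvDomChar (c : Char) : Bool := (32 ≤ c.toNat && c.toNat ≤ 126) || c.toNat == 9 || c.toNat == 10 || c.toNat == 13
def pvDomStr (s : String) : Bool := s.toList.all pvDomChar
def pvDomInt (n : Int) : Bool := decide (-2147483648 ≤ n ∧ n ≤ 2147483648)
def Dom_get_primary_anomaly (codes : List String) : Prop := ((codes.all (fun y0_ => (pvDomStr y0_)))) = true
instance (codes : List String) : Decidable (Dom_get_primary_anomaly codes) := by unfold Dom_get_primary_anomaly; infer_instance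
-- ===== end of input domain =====

-- B replaces A's 12 membership scans of the codes list by one rank dictionary and a single
-- min-over-codes accumulator pass (objective: alternative decomposition, same result).

-- ===== PORT A =====
-- priority_order = ['A','B','C','D','E','F','G','H','J','L','N','O']
def pvPrio : List String := ["A", "B", "C", "D", "E", "F", "G", "H", "J", "L", "N", "O"]

-- `for code in priority_order: if code in codes: return code` / final `return 'Nr'`
def pvLoopA (P : List String) (ucodes : List String) : String :=
  match P with
  | [] => "Nr"
  | c :: rest => if ucodes.contains c then c else pvLoopA rest ucodes

def get_primary_anomaly (codes : List String) : String :=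
  if codes = [] ∨ codes = ["NR"] then "Nr"
  else
    let ucodes := codes.map PySem.Str.upper
    pvLoopA pvPrio ucodes

-- ===== PORT B =====
-- _RANK = {c: i for i, c in enumerate(_PRIORITY)}
def pvRank : PySem.Dict String Int :=
  PySem.Dict.ofList ((PySem.List.enumerate pvPrio).map (fun p => (p.2, p.1)))

-- the loop body: u = c.upper(); r = _RANK.get(u); if r is not None and (best is None or r < best[0]): best = (r, u)
def pvStep (b : Option (Int × String)) (c : String) : Option (Int × String) :=
  let u := PySem.Str.upper c
  match PySem.Dict.get? pvRank u with
  | none => b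
  | some r =>
    match b with
    | none => some (r, u)
    | some (r0, u0) => if r < r0 then some (r, u) else some (r0, u0)

def get_primary_anomaly_alt (codes : List String) : String :=
  if codes = [] ∨ codes = ["NR"] then "Nr"
  else
    match codes.foldl pvStep none with
    | none => "Nr"
    | some (_, u) => u

-- ===== PRECONDITION & SPEC =====
def Spec_get_primary_anomaly (codes : List String) (out : String) : Prop := out = get_primary_anomaly_alt codes
instance (codes : List String) (out : String) : Decidable (Spec_get_primary_anomaly codes out) := by unfold Spec_get_primary_anomaly; infer_instance

-- ===== CLAIM (what is proved, stated in full; the proofs are below) =====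
def Claim_equal_get_primary_anomaly : Prop := ∀ (codes : List String), Dom_get_primary_anomaly codes → Spec_get_primary_anomaly codes (get_primary_anomaly codes)

-- ===== LEMMAS AND PROOFS =====

-- left-biased min-by-rank on optional (rank, letter) pairs
def pvMerge (b h : Option (Int × String)) : Option (Int × String) :=
  match h with
  | none => b
  | some (r, u) =>
    match b with
    | none => some (r, u)
    | some (r0, u0) => if r < r0 then some (r, u) else some (r0, u0)

def pvHit (c : String) : Option (Int × String) :=
  (PySem.Dict.get? pvRank (PySem.Str.upper c)).map (fun r => (r, PySem.Str.upper c))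

def pvFF : List String → Option (Int × String)
  | [] => none
  | c :: L => pvMerge (pvHit c) (pvFF L)

def pvMinN (x y : Option Nat) : Option Nat :=
  match x, y with
  | none, y => y
  | some i, none => some i
  | some i, some j => some (if j < i then j else i)

def pvMapIdx (x : Option Nat) : Option (Int × String) :=
  x.map (fun i => ((Int.ofNat i), pvPrio.getD i ""))

lemma pvMerge_none_left (x : Option (Int × String)) : pvMerge none x = x := by
  cases x with
  | none => rfl
  | some p => cases p; rfl

lemma pvMerge_none_right (x : Option (Int × String)) : pvMerge x none = x := rfl

lemma pvMerge_assoc (a b c : Option (Int × String)) :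
    pvMerge (pvMerge a b) c = pvMerge a (pvMerge b c) := by
  cases a with
  | none => simp [pvMerge_none_left]
  | some pa =>
    cases b with
    | none => simp [pvMerge_none_left, pvMerge_none_right]
    | some pb =>
      cases c with
      | none => simp [pvMerge_none_right]
      | some pc =>
        obtain ⟨ra, ua⟩ := pa
        obtain ⟨rb, ub⟩ := pb
        obtain ⟨rc, uc⟩ := pc
        by_cases h1 : rb < ra <;> by_cases h2 : rc < rb <;> by_cases h3 : rc < ra <;>
          simp [pvMerge, h1, h2, h3] <;> omega

lemma pvStep_eq (b : Option (Int × String)) (c : String) :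
    pvStep b c = pvMerge b (pvHit c) := by
  simp only [pvStep, pvHit, pvMerge]
  cases PySem.Dict.get? pvRank (PySem.Str.upper c) <;> cases b <;> rfl

lemma pvFoldl_merge (L : List String) (b : Option (Int × String)) :
    L.foldl pvStep b = pvMerge b (pvFF L) := by
  induction L generalizing b with
  | nil => simp [pvFF, pvMerge_none_right]
  | cons c L ih =>
    simp only [List.foldl_cons, pvFF]
    rw [ih, pvStep_eq, pvMerge_assoc]

set_option maxHeartbeats 1000000 in
lemma pvRank_mk : pvRank = PySem.Dict.mk
    [("A", (0 : Int)), ("B", 1), ("C", 2), ("D", 3), ("E", 4), ("F", 5),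
     ("G", 6), ("H", 7), ("J", 8), ("L", 9), ("N", 10), ("O", 11)] := by decide

set_option maxHeartbeats 1000000 in
lemma pvRk_eq (u : String) :
    PySem.Dict.get? pvRank u = (pvPrio.findIdx? (fun a => a == u)).map (fun i => Int.ofNat i) := by
  rw [pvRank_mk]
  simp only [pvPrio, PySem.Dict.get?_mk_cons]
  by_cases h1 : ("A" : String) == u
  · simp [List.findIdx?_cons, h1]
  by_cases h2 : ("B" : String) == u
  · simp [List.findIdx?_cons, h1, h2]
  by_cases h3 : ("C" : String) == u
  · simp [List.findIdx?_cons, h1, h2, h3]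
  by_cases h4 : ("D" : String) == u
  · simp [List.findIdx?_cons, h1, h2, h3, h4]
  by_cases h5 : ("E" : String) == u
  · simp [List.findIdx?_cons, h1, h2, h3, h4, h5]
  by_cases h6 : ("F" : String) == u
  · simp [List.findIdx?_cons, h1, h2, h3, h4, h5, h6]
  by_cases h7 : ("G" : String) == u
  · simp [List.findIdx?_cons, h1, h2, h3, h4, h5, h6, h7]
  by_cases h8 : ("H" : String) == u
  · simp [List.findIdx?_cons, h1, h2, h3, h4, h5, h6, h7, h8]
  by_cases h9 : ("J" : String) == u
  · simp [List.findIdx?_cons, h1, h2, h3, h4, h5, h6, h7, h8, h9]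
  by_cases h10 : ("L" : String) == u
  · simp [List.findIdx?_cons, h1, h2, h3, h4, h5, h6, h7, h8, h9, h10]
  by_cases h11 : ("N" : String) == u
  · simp [List.findIdx?_cons, h1, h2, h3, h4, h5, h6, h7, h8, h9, h10, h11]
  by_cases h12 : ("O" : String) == u
  · simp [List.findIdx?_cons, h1, h2, h3, h4, h5, h6, h7, h8, h9, h10, h11, h12]
  simp [List.findIdx?_cons, List.findIdx?_nil, h1, h2, h3, h4, h5, h6, h7, h8, h9, h10, h11, h12, PySem.Dict.get?]

lemma pvGetD_of_findIdx (P : List String) (u : String) (i : Nat)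
    (h : P.findIdx? (fun a => a == u) = some i) : P.getD i "" = u := by
  induction P generalizing i with
  | nil => simp [List.findIdx?_nil] at h
  | cons a P ih =>
    rw [List.findIdx?_cons] at h
    by_cases ha : a == u
    · simp [ha] at h
      subst h
      simpa using ha
    · simp [ha] at h
      obtain ⟨j, hj, rfl⟩ := h
      simpa using ih j hj

lemma pvHit_eq (c : String) :
    pvHit c = pvMapIdx (pvPrio.findIdx? (fun a => a == PySem.Str.upper c)) := by
  simp only [pvHit, pvMapIdx, pvRk_eq]
  cases h : pvPrio.findIdx? (fun a => a == PySem.Str.upper c) with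
  | none => rfl
  | some i =>
    simp only [Option.map_some]
    rw [pvGetD_of_findIdx pvPrio (PySem.Str.upper c) i h]

lemma pvMinN_zero_left (y : Option Nat) : pvMinN (some 0) y = some 0 := by
  cases y <;> simp [pvMinN]

lemma pvMinN_zero_right (x : Option Nat) : pvMinN x (some 0) = some 0 := by
  cases x <;> simp [pvMinN]

lemma pvMinN_map_succ (x y : Option Nat) :
    pvMinN (x.map (· + 1)) (y.map (· + 1)) = (pvMinN x y).map (· + 1) := by
  cases x <;> cases y <;> simp [pvMinN] <;> split_ifs <;> simp

lemma pvFindIdx_or (P : List String) (p q : String → Bool) :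
    P.findIdx? (fun a => p a || q a) = pvMinN (P.findIdx? p) (P.findIdx? q) := by
  induction P with
  | nil => rfl
  | cons a P ih =>
    rw [List.findIdx?_cons, List.findIdx?_cons, List.findIdx?_cons]
    by_cases hp : p a <;> by_cases hq : q a <;>
      simp [hp, hq, ih, pvMinN_zero_left, pvMinN_zero_right, pvMinN_map_succ]

lemma pvMerge_mapIdx (x y : Option Nat) :
    pvMerge (pvMapIdx x) (pvMapIdx y) = pvMapIdx (pvMinN x y) := by
  cases x with
  | none => cases y <;> simp [pvMapIdx, pvMinN, pvMerge_none_left]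
  | some i =>
    cases y with
    | none => simp [pvMapIdx, pvMinN, pvMerge_none_right]
    | some j =>
      simp only [pvMapIdx, pvMinN, Option.map_some, pvMerge]
      split_ifs <;> simp_all

lemma pvFF_eq (L : List String) :
    pvFF L = pvMapIdx (pvPrio.findIdx? (fun a => (L.map PySem.Str.upper).contains a)) := by
  induction L with
  | nil => rfl
  | cons c L ih =>
    have hpred : (fun a => ((c :: L).map PySem.Str.upper).contains a) =
        (fun a => (a == PySem.Str.upper c) || (L.map PySem.Str.upper).contains a) := by
      funext a
      rw [List.map_cons, List.contains_cons]
    simp only [pvFF, ih, pvHit_eq, pvMerge_mapIdx, hpred, pvFindIdx_or]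

lemma pvLoopA_eq (P L : List String) :
    pvLoopA P L = (P.find? (fun c => L.contains c)).getD "Nr" := by
  induction P with
  | nil => rfl
  | cons a P ih =>
    rw [List.find?_cons]
    by_cases h : a ∈ L <;> simp [pvLoopA, h, ih]

lemma pvFind?_eq (P : List String) (p : String → Bool) :
    P.find? p = (P.findIdx? p).map (fun i => P.getD i "") := by
  induction P with
  | nil => rfl
  | cons a P ih =>
    rw [List.find?_cons, List.findIdx?_cons]
    by_cases h : p a
    · simp [h]
    · simp only [h, Bool.false_eq_true, if_false, ih, Option.map_map]
      cases P.findIdx? p <;> simp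

-- ===== VERDICT (by name: the statement is the Claim_ definition above) =====
theorem get_primary_anomaly_spec : Claim_equal_get_primary_anomaly := by
  intro codes _
  unfold Spec_get_primary_anomaly get_primary_anomaly get_primary_anomaly_alt
  by_cases hg : codes = [] ∨ codes = ["NR"]
  · simp [hg]
  · simp only [hg, if_false]
    rw [pvFoldl_merge, pvMerge_none_left, pvFF_eq, pvLoopA_eq, pvFind?_eq]
    cases pvPrio.findIdx? (fun a => (codes.map PySem.Str.upper).contains a) <;>
      simp [pvMapIdx]
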